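-- pv_equiv track=rewrite | github.com/amfaro/jarify | src/jarify/sqlmesh.py | _consume_optional_semicolon_and_blank_lines
-- ===== SOURCE A (Python) =====
-- def _consume_optional_semicolon_and_blank_lines(sql: str, pos: int) -> int:
--     i = pos
--     while i < len(sql) and sql[i] in " \t":
--         i += 1
--     if i < len(sql) and sql[i] == ";":
--         i += 1
--     if i < len(sql) and sql[i] == "\r":
--         i += 1
--     if i < len(sql) and sql[i] == "\n":
--         i += 1
--     while True:
--         line_end = sql.find("\n", i)
--         if line_end == -1:
--             line = sql[i:]
--             if line.strip():
--                 return i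
--             return len(sql)
--         line = sql[i : line_end + 1]
--         if line.strip():
--             return i
--         i = line_end + 1
-- ===== SOURCE B (Python) =====
-- def _consume_optional_semicolon_and_blank_lines(sql: str, pos: int) -> int:
--     n = len(sql)
--     i = pos
--     while i < n and sql[i] in " \t":
--         i += 1
--     if i < n and sql[i] == ";":
--         i += 1
--     if i < n and sql[i] == "\r":
--         i += 1
--     if i < n and sql[i] == "\n":
--         i += 1
--     # single forward character scan instead of find/slice/strip line loop
--     line_start = i
--     for j in range(i, n):
--         c = sql[j]
--         if c == "\n":
--             line_start = j + 1
--         elif not c.isspace():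
--             return line_start
--     return n
-- ===== Notes on version B (the rewrite author's own statement) =====
-- stated objective: simpler
-- what changed: The find/slice/strip blank-line loop is replaced by a single forward character scan that tracks the start of the current line and returns it at the first non-whitespace character, with no substring allocation; the initial semicolon/CR/LF consumption is kept.
-- outside the precondition, e.g. on _consume_optional_semicolon_and_blank_lines('\r ; ;\r\r', -3): A returns 7, B returns -1; on _consume_optional_semicolon_and_blank_lines('x', -5): A raises IndexError, B raises IndexError
import Mathlib
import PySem

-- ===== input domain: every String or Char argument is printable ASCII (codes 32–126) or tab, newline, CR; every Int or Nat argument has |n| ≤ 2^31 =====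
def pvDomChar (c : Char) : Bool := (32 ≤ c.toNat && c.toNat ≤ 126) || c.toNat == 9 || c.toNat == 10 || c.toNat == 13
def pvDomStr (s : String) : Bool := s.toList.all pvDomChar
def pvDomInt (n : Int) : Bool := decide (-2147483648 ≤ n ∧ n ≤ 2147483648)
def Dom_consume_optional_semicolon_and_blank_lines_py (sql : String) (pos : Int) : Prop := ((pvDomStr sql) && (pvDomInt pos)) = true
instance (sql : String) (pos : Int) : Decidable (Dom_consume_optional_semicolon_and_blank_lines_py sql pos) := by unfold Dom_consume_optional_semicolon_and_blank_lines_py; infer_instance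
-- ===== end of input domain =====

-- B replaces A's find/slice/strip blank-line loop by a single forward character scan that
-- tracks the start of the current line (simpler: no substring slicing); phase 1 is unchanged.


-- ===== PORT A =====
-- Phase 1 is the SAME source code in A and in Source B, so its helpers are shared by both ports.
-- `while i < len(sql) and sql[i] in " \t": i += 1`, as recursion over the suffix at i:
def pvSkipWS : List Char → Nat → List Char × Nat
  | [], i => ([], i)
  | c :: rest, i => if c = ' ' ∨ c = '\t' then pvSkipWS rest (i + 1) else (c :: rest, i)

-- `if i < len(sql) and sql[i] == ch: i += 1`:
def pvOpt (ch : Char) : List Char × Nat → List Char × Nat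
  | ([], i) => ([], i)
  | (c :: rest, i) => if c = ch then (rest, i + 1) else (c :: rest, i)

def pvPhase1 (cs : List Char) (i0 : Nat) : List Char × Nat :=
  pvOpt '\n' (pvOpt '\r' (pvOpt ';' (pvSkipWS (cs.drop i0) i0)))

-- A's `while True` loop: s = suffix at i, n = len(sql); `sql.find("\n", i)` is the
-- first '\n' of the suffix, `sql[i:line_end+1]` / `sql[i:]` its take/whole.
def pvA_blank (s : List Char) (i n : Nat) : Nat :=
  match h : s.findIdx? (· = '\n') with
  | none => if PySem.Chars.strip s ≠ [] then i else n
  | some k =>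
      if PySem.Chars.strip (s.take (k + 1)) ≠ [] then i
      else pvA_blank (s.drop (k + 1)) (i + (k + 1)) n
termination_by s.length
decreasing_by
  cases s with
  | nil => simp at h
  | cons a t => simp [List.length_drop]

def consume_optional_semicolon_and_blank_lines_py (sql : String) (pos : Int) : Int :=
  let cs := sql.toList
  let p := pvPhase1 cs pos.toNat   -- Pre_ guarantees 0 ≤ pos
  (pvA_blank p.1 p.2 cs.length : Int)

-- ===== PORT B =====
-- Source B's single scan: `for j in range(i, n): c = sql[j]; if c == "\n": line_start = j+1;
-- elif not c.isspace(): return line_start` then `return n`.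
def pvB_scan : List Char → Nat → Nat → Nat → Nat
  | [], _, _, n => n
  | c :: rest, j, lineStart, n =>
      if c = '\n' then pvB_scan rest (j + 1) (j + 1) n
      else if PySem.Chars.isspace c then pvB_scan rest (j + 1) lineStart n
      else lineStart

def consume_optional_semicolon_and_blank_lines_py_alt (sql : String) (pos : Int) : Int :=
  let cs := sql.toList
  let p := pvPhase1 cs pos.toNat   -- Pre_ guarantees 0 ≤ pos
  (pvB_scan p.1 p.2 p.2 cs.length : Int)

-- ===== PRECONDITION & SPEC =====
-- Pre_ restricts to the natural domain of scan positions: on negative pos, A either raises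
-- IndexError (pos < -len(sql)) or reads via Python's negative-index wraparound, which is
-- accidental for a scanner position; B does the natural thing there.
def Pre_consume_optional_semicolon_and_blank_lines_py (sql : String) (pos : Int) : Prop := 0 ≤ pos
instance (sql : String) (pos : Int) : Decidable (Pre_consume_optional_semicolon_and_blank_lines_py sql pos) := by unfold Pre_consume_optional_semicolon_and_blank_lines_py; infer_instance

def pvWitness_consume_optional_semicolon_and_blank_lines_py : String × Int := ("  ;\r\n \t\nx y", 0)

def Spec_consume_optional_semicolon_and_blank_lines_py (sql : String) (pos : Int) (out : Int) : Prop := out = consume_optional_semicolon_and_blank_lines_py_alt sql pos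
instance (sql : String) (pos : Int) (out : Int) : Decidable (Spec_consume_optional_semicolon_and_blank_lines_py sql pos out) := by unfold Spec_consume_optional_semicolon_and_blank_lines_py; infer_instance

-- ===== CLAIM (what is proved, stated in full; the proofs are below) =====
def Claim_equal_consume_optional_semicolon_and_blank_lines_py : Prop := ∀ (sql : String) (pos : Int), Dom_consume_optional_semicolon_and_blank_lines_py sql pos → Pre_consume_optional_semicolon_and_blank_lines_py sql pos → Spec_consume_optional_semicolon_and_blank_lines_py sql pos (consume_optional_semicolon_and_blank_lines_py sql pos)

-- ===== LEMMAS AND PROOFS =====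

-- Python-strip truthiness: the stripped string is empty iff every character is whitespace.
theorem pv_strip_eq_nil_iff (l : List Char) :
    PySem.Chars.strip l = [] ↔ ∀ c ∈ l, PySem.Chars.isspace c = true := by
  have dw : ∀ (l : List Char),
      ((∀ c ∈ List.dropWhile PySem.Chars.isspace l, PySem.Chars.isspace c = true) ↔
        (∀ c ∈ l, PySem.Chars.isspace c = true)) := by
    intro l
    induction l with
    | nil => simp
    | cons a t ih =>
      by_cases hp : PySem.Chars.isspace a = true
      · simp [hp, ih]
      · simp [hp]
  rw [PySem.Chars.strip, PySem.Chars.rstrip, PySem.Chars.lstrip,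
    List.reverse_eq_nil_iff, List.dropWhile_eq_nil_iff]
  simp only [List.mem_reverse]
  exact dw l

-- B's scan over a whitespace, newline-free prefix just advances the index.
theorem pvB_scan_ws_prefix (p t : List Char) (j ls n : Nat)
    (hws : ∀ c ∈ p, PySem.Chars.isspace c = true ∧ c ≠ '\n') :
    pvB_scan (p ++ t) j ls n = pvB_scan t (j + p.length) ls n := by
  induction p generalizing j with
  | nil => simp
  | cons a q ih =>
    obtain ⟨ha, ha'⟩ := hws a (by simp)
    have hrec := ih (j + 1) (fun c hc => hws c (by simp [hc]))
    have harith : j + 1 + q.length = j + (a :: q).length := by simp; omega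
    rw [harith] at hrec
    simpa only [List.cons_append, pvB_scan, if_neg ha', if_pos ha] using hrec

-- B's scan over a newline-free prefix containing a non-whitespace character returns lineStart.
theorem pvB_scan_nonws (p t : List Char) (j ls n : Nat)
    (hnl : ∀ c ∈ p, c ≠ '\n') (hx : ∃ c ∈ p, PySem.Chars.isspace c = false) :
    pvB_scan (p ++ t) j ls n = ls := by
  induction p generalizing j with
  | nil => simp at hx
  | cons a q ih =>
    have ha' : a ≠ '\n' := hnl a (by simp)
    by_cases ha : PySem.Chars.isspace a = true
    · have hx' : ∃ c ∈ q, PySem.Chars.isspace c = false := by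
        rcases hx with ⟨c, hc, hcs⟩
        rcases List.mem_cons.mp hc with rfl | hc
        · exact absurd ha (by simp [hcs])
        · exact ⟨c, hc, hcs⟩
      simpa [pvB_scan, ha', ha] using ih (j + 1) (fun c hc => hnl c (by simp [hc])) hx'
    · simp [pvB_scan, ha', ha]

-- Main lemma: A's blank-line loop equals B's character scan started at the same index.
theorem pv_blank_eq_scan (s : List Char) (i n : Nat) :
    pvA_blank s i n = pvB_scan s i i n := by
  induction hL : s.length using Nat.strong_induction_on generalizing s i with
  | _ L IH =>
  rw [pvA_blank]
  cases h : s.findIdx? (· = '\n') with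
  | none =>
    have hnl : ∀ c ∈ s, c ≠ '\n' := by
      intro c hc
      have := List.findIdx?_eq_none_iff.mp h c hc
      simpa using this
    by_cases hstrip : PySem.Chars.strip s = []
    · have hws : ∀ c ∈ s, PySem.Chars.isspace c = true := (pv_strip_eq_nil_iff s).mp hstrip
      have := pvB_scan_ws_prefix s [] i i n (fun c hc => ⟨hws c hc, hnl c hc⟩)
      simp only [List.append_nil] at this
      simp [hstrip, this, pvB_scan]
    · have hx : ∃ c ∈ s, PySem.Chars.isspace c = false := by
        by_contra hall
        push Not at hall
        exact hstrip ((pv_strip_eq_nil_iff s).mpr (fun c hc => by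
          have := hall c hc; simpa using this))
      have := pvB_scan_nonws s [] i i n hnl hx
      simp only [List.append_nil] at this
      simp [hstrip, this]
  | some k =>
    obtain ⟨hk, hknl, hkfirst⟩ := List.findIdx?_eq_some_iff_getElem.mp h
    have hsk : s[k] = '\n' := by simpa using hknl
    have hfirst : ∀ c ∈ s.take k, c ≠ '\n' := by
      intro c hc
      obtain ⟨m, hm, rfl⟩ := List.mem_take_iff_getElem.mp hc
      have := hkfirst m (by omega)
      simpa using this
    have hsplit : s = s.take k ++ '\n' :: s.drop (k + 1) := by
      conv_lhs => rw [← List.take_append_drop k s]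
      rw [List.drop_eq_getElem_cons hk, hsk]
    have htake : s.take (k + 1) = s.take k ++ ['\n'] := by
      rw [List.take_add_one]
      simp [List.getElem?_eq_getElem hk, hsk]
    have hlen_take : (s.take k).length = k := by simp [List.length_take]; omega
    by_cases hstrip : PySem.Chars.strip (s.take (k + 1)) = []
    · -- blank line: both skip it and continue after the newline
      have hws : ∀ c ∈ s.take k, PySem.Chars.isspace c = true := by
        intro c hc
        exact (pv_strip_eq_nil_iff _).mp hstrip c (by simp [htake, hc])
      have hrec := IH (s.drop (k + 1)).length (by simp [List.length_drop]; omega)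
        (s.drop (k + 1)) (i + (k + 1)) rfl
      have hB : pvB_scan s i i n = pvB_scan (s.drop (k + 1)) (i + (k + 1)) (i + (k + 1)) n := by
        conv_lhs => rw [hsplit]
        rw [pvB_scan_ws_prefix _ _ i i n (fun c hc => ⟨hws c hc, hfirst c hc⟩), hlen_take]
        show pvB_scan ('\n' :: s.drop (k + 1)) (i + k) i n = _
        rw [pvB_scan, if_pos rfl, Nat.add_assoc]
      simp only [hstrip, ne_eq, not_true_eq_false, if_false, hB, hrec]
    · -- non-blank line: both return i
      have hx : ∃ c ∈ s.take k, PySem.Chars.isspace c = false := by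
        by_contra hall
        push Not at hall
        refine hstrip ((pv_strip_eq_nil_iff _).mpr ?_)
        intro c hc
        rw [htake] at hc
        rcases List.mem_append.mp hc with hc | hc
        · have := hall c hc; simpa using this
        · simp at hc; subst hc; decide
      have hB : pvB_scan s i i n = i := by
        conv_lhs => rw [hsplit]
        exact pvB_scan_nonws _ _ i i n hfirst hx
      simp [hstrip, hB]

-- ===== VERDICT (by name: the statement is the Claim_ definition above) =====
theorem consume_optional_semicolon_and_blank_lines_py_spec : Claim_equal_consume_optional_semicolon_and_blank_lines_py := by
  intro sql pos _ _
  unfold Spec_consume_optional_semicolon_and_blank_lines_py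
  unfold consume_optional_semicolon_and_blank_lines_py consume_optional_semicolon_and_blank_lines_py_alt
  simp only [pv_blank_eq_scan]
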